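-- pv_equiv track=rewrite | github.com/FriwiDev/thesis | openapi/latex/main.py | build_lstlstings
-- ===== SOURCE A (Python) =====
-- def build_lstlstings(src: str) -> [str]:
--     lines_per = 35
--     spl = src.split("\n")
--     i = 0
--     ret = []
--     build = "\\begin{lstlisting}[language=bash]\n"
--     for s in spl:
--         build += s + "\n"
--         i += 1
--         if i % lines_per == 0:
--             build += "\\end{lstlisting}"
--             ret.append(build)
--             build = "\\begin{lstlisting}[language=bash, firstnumber="+str(i+1)+"]\n"
--     if i % lines_per != 0:
--         build += "\\end{lstlisting}"
--         ret.append(build)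
--     return ret
-- ===== SOURCE B (Python) =====
-- def build_lstlstings(src: str) -> [str]:
--     spl = src.split("\n")
--     ret = []
--     for c in range(0, len(spl), 35):
--         chunk = spl[c:c + 35]
--         if c == 0:
--             header = "\\begin{lstlisting}[language=bash]\n"
--         else:
--             header = "\\begin{lstlisting}[language=bash, firstnumber=" + str(c + 1) + "]\n"
--         ret.append(header + "\n".join(chunk) + "\n" + "\\end{lstlisting}")
--     return ret
-- ===== Notes on version B (the rewrite author's own statement) =====
-- stated objective: simpler
-- what changed: Replaces the running line counter with modulo boundary detection and incremental string accumulation by direct chunk slicing (range with step 35) plus joining each chunk with the line separator.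
import Mathlib
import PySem

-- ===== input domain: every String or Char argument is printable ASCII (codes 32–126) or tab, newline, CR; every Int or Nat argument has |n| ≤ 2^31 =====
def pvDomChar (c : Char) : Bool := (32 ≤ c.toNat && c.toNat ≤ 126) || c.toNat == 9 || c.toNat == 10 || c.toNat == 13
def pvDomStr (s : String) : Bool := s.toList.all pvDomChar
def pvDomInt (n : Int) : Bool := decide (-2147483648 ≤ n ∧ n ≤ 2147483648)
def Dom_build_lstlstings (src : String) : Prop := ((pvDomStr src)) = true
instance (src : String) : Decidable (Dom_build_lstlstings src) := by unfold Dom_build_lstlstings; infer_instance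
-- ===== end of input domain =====

-- B replaces A's running line counter with modulo boundary detection and incremental
-- string accumulation by direct chunk slicing (range step 35) plus join — simpler decomposition.

-- ===== PORT A =====
-- one loop step: build += s + "\n"; i += 1; boundary check
def lstStep (st : Int × List String × String) (s : String) : Int × List String × String :=
  let build := st.2.2 ++ s ++ "\n"
  let i := st.1 + 1
  if PySem.Int.mod i 35 = 0 then
    (i, st.2.1 ++ [build ++ "\\end{lstlisting}"],
     "\\begin{lstlisting}[language=bash, firstnumber=" ++ PySem.Int.toStr (i + 1) ++ "]\n")
  else
    (i, st.2.1, build)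

-- the trailing 'if i % lines_per != 0' flush
def lstFin (st : Int × List String × String) : List String :=
  if PySem.Int.mod st.1 35 ≠ 0 then st.2.1 ++ [st.2.2 ++ "\\end{lstlisting}"] else st.2.1

def build_lstlstings (src : String) : List String :=
  let spl := (PySem.Str.split? src "\n").getD []   -- sep "\n" ≠ "", so split? is always some
  lstFin (spl.foldl lstStep (0, [], "\\begin{lstlisting}[language=bash]\n"))

-- ===== PORT B =====
def lstHeader (c : Int) : String :=
  if c = 0 then "\\begin{lstlisting}[language=bash]\n"
  else "\\begin{lstlisting}[language=bash, firstnumber=" ++ PySem.Int.toStr (c + 1) ++ "]\n"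

def build_lstlstings_alt (src : String) : List String :=
  let spl := (PySem.Str.split? src "\n").getD []   -- sep "\n" ≠ "", so split? is always some
  (PySem.List.pyRange 0 (spl.length : Int) 35).foldl
    (fun ret c =>
      ret ++ [lstHeader c ++ PySem.Str.join "\n" (PySem.List.slice spl (some c) (some (c + 35)))
                ++ "\n" ++ "\\end{lstlisting}"]) []

-- ===== PRECONDITION & SPEC =====
def Spec_build_lstlstings (src : String) (out : List String) : Prop := out = build_lstlstings_alt src
instance (src : String) (out : List String) : Decidable (Spec_build_lstlstings src out) := by unfold Spec_build_lstlstings; infer_instance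

-- ===== CLAIM (what is proved, stated in full; the proofs are below) =====
def Claim_equal_build_lstlstings : Prop := ∀ (src : String), Dom_build_lstlstings src → Spec_build_lstlstings src (build_lstlstings src)

-- ===== LEMMAS AND PROOFS =====

-- concatenation of the lines each followed by "\n" (A's incremental build)
def catNL : List String → String
  | [] => ""
  | x :: xs => x ++ "\n" ++ catNL xs

-- the common chunk decomposition both ports are reduced to
def blocks : List String → Nat → List String
  | [], _ => []
  | x :: xs, k =>
    (lstHeader (35 * k) ++ PySem.Str.join "\n" (List.take 35 (x :: xs)) ++ "\n" ++ "\\end{lstlisting}")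
      :: blocks (List.drop 35 (x :: xs)) (k + 1)
termination_by spl _ => spl.length
decreasing_by simp

lemma blocks_nil (k : Nat) : blocks [] k = [] := by rw [blocks]

lemma blocks_cons (x : String) (xs : List String) (k : Nat) :
    blocks (x :: xs) k =
    (lstHeader (35 * k) ++ PySem.Str.join "\n" (List.take 35 (x :: xs)) ++ "\n" ++ "\\end{lstlisting}")
      :: blocks (List.drop 35 (x :: xs)) (k + 1) := by rw [blocks]

lemma catNL_append (xs ys : List String) : catNL (xs ++ ys) = catNL xs ++ catNL ys := by
  induction xs with
  | nil => simp [catNL]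
  | cons x xs ih => simp [catNL, ih, String.append_assoc]

lemma join_nl (x : String) (xs : List String) :
    PySem.Str.join "\n" (x :: xs) ++ "\n" = catNL (x :: xs) := by
  induction xs generalizing x with
  | nil =>
    apply String.toList_inj.mp
    simp [PySem.Str.toList_join, PySem.Chars.join_singleton, catNL]
  | cons y ys ih =>
    apply String.toList_inj.mp
    have h := congrArg String.toList (ih y)
    simp only [String.toList_append, PySem.Str.toList_join, List.map_cons] at h ⊢
    rw [PySem.Chars.join_cons_cons]
    simp [catNL, String.toList_append] at h ⊢
    simp [h]

lemma join_nl' (xs : List String) (h : xs ≠ []) :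
    PySem.Str.join "\n" xs ++ "\n" = catNL xs := by
  cases xs with
  | nil => exact absurd rfl h
  | cons x xs => exact join_nl x xs

lemma mod35_eq (a : Int) : PySem.Int.mod a 35 = a % 35 :=
  PySem.Int.mod_eq_emod_of_pos (by norm_num)

lemma foldA_no_trigger (xs : List String) :
    ∀ (i : Int) (ret : List String) (p : String),
    (∀ t : Int, 1 ≤ t → t ≤ xs.length → PySem.Int.mod (i + t) 35 ≠ 0) →
    xs.foldl lstStep (i, ret, p) = (i + xs.length, ret, p ++ catNL xs) := by
  induction xs with
  | nil => intro i ret p _; simp [catNL]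
  | cons x xs ih =>
    intro i ret p h
    have h1 : PySem.Int.mod (i + 1) 35 ≠ 0 := h 1 (by omega) (by simp)
    have step : lstStep (i, ret, p) x = (i + 1, ret, p ++ x ++ "\n") := by
      simp only [lstStep]
      rw [if_neg h1]
    rw [List.foldl_cons, step, ih (i + 1) ret (p ++ x ++ "\n")
      (by intro t ht1 ht2; have := h (t + 1) (by omega) (by simp; omega);
          rwa [show i + (t + 1) = i + 1 + t by ring] at this)]
    simp only [Prod.mk.injEq, catNL, List.length_cons]
    refine ⟨by push_cast; ring, by simp, by simp [String.append_assoc]⟩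

lemma foldA_blocks : ∀ (n : Nat) (spl : List String), spl.length ≤ n →
    ∀ (k : Nat) (ret : List String),
    lstFin (spl.foldl lstStep (((35 * k : Nat) : Int), ret, lstHeader (35 * k))) = ret ++ blocks spl k := by
  intro n
  induction n with
  | zero =>
    intro spl hlen k ret
    have h0 : spl = [] := List.eq_nil_of_length_eq_zero (by omega)
    subst h0
    have hmod0 : PySem.Int.mod ((35 * k : Nat) : Int) 35 = 0 := by
      rw [mod35_eq]; push_cast; omega
    simp [lstFin, blocks_nil, hmod0]
  | succ m ih =>
    intro spl hlen k ret
    cases spl with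
    | nil =>
      have hmod0 : PySem.Int.mod ((35 * k : Nat) : Int) 35 = 0 := by
        rw [mod35_eq]; push_cast; omega
      simp [lstFin, blocks_nil, hmod0]
    | cons x xs =>
      have hL : 1 ≤ (x :: xs).length := by simp
      by_cases hsmall : (x :: xs).length < 35
      · -- short final chunk: no boundary is hit, the trailing flush emits the block
        rw [foldA_no_trigger _ _ _ _ (by
          intro t ht1 ht2
          rw [mod35_eq]
          omega)]
        have hmod : PySem.Int.mod (((35 * k : Nat) : Int) + ((x :: xs).length : Int)) 35 ≠ 0 := by
          rw [mod35_eq]; omega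
        rw [lstFin, if_pos hmod]
        have htake : List.take 35 (x :: xs) = x :: xs := List.take_of_length_le (by omega)
        have hdrop : List.drop 35 (x :: xs) = [] := List.drop_eq_nil_of_le (by omega)
        rw [blocks_cons, htake, hdrop, blocks_nil, ← join_nl]
        simp [String.append_assoc]
      · -- a full chunk of 35: 34 quiet steps, the boundary step, then recurse
        push_neg at hsmall
        have h34lt : 34 < (x :: xs).length := by omega
        obtain ⟨g, hget⟩ : ∃ g, (x :: xs)[34]? = some g :=
          ⟨(x :: xs)[34], List.getElem?_eq_getElem h34lt⟩
        have h34 : (List.take 34 (x :: xs)).length = 34 := by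
          rw [List.length_take]; omega
        have htake35 : List.take 35 (x :: xs) = List.take 34 (x :: xs) ++ [g] := by
          rw [show (35 : Nat) = 34 + 1 from rfl, List.take_succ, hget]
          rfl
        have hsplit : x :: xs = (List.take 34 (x :: xs) ++ [g]) ++ List.drop 35 (x :: xs) := by
          conv_lhs => rw [← List.take_append_drop 35 (x :: xs)]
          rw [htake35]
        have hfold1 : (List.take 34 (x :: xs)).foldl lstStep
            (((35 * k : Nat) : Int), ret, lstHeader (35 * k)) =
            (((35 * k : Nat) : Int) + ((List.take 34 (x :: xs)).length : Int), ret,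
              lstHeader (35 * k) ++ catNL (List.take 34 (x :: xs))) := by
          refine foldA_no_trigger _ _ _ _ ?_
          intro t ht1 ht2
          rw [mod35_eq]
          rw [h34] at ht2
          omega
        have hm : PySem.Int.mod (((35 * k : Nat) : Int) + ((List.take 34 (x :: xs)).length : Int) + 1) 35 = 0 := by
          rw [mod35_eq, h34]; omega
        have hstep : lstStep (((35 * k : Nat) : Int) + ((List.take 34 (x :: xs)).length : Int), ret,
              lstHeader (35 * k) ++ catNL (List.take 34 (x :: xs))) g =
            (((35 * k : Nat) : Int) + ((List.take 34 (x :: xs)).length : Int) + 1,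
              ret ++ [lstHeader (35 * k) ++ catNL (List.take 34 (x :: xs)) ++ g ++ "\n" ++ "\\end{lstlisting}"],
              "\\begin{lstlisting}[language=bash, firstnumber=" ++
                PySem.Int.toStr (((35 * k : Nat) : Int) + ((List.take 34 (x :: xs)).length : Int) + 1 + 1) ++ "]\n") := by
          simp only [lstStep, hm]
          simp
        have e1 : ((35 * k : Nat) : Int) + ((List.take 34 (x :: xs)).length : Int) + 1
            = ((35 * (k + 1) : Nat) : Int) := by
          rw [h34]; push_cast; ring
        have e2 : "\\begin{lstlisting}[language=bash, firstnumber=" ++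
              PySem.Int.toStr (((35 * (k + 1) : Nat) : Int) + 1) ++ "]\n" = lstHeader (35 * ((k + 1 : Nat) : Int)) := by
          rw [lstHeader, if_neg (by push_cast; omega)]
          norm_cast
        conv_lhs => rw [hsplit, List.foldl_append, List.foldl_append, hfold1,
          List.foldl_cons, List.foldl_nil, hstep, e1, e2]
        rw [ih (List.drop 35 (x :: xs)) (by simp only [List.length_drop]; omega) (k + 1)]
        rw [blocks_cons, htake35]
        have hjoin : PySem.Str.join "\n" (List.take 34 (x :: xs) ++ [g]) ++ "\n"
            = catNL (List.take 34 (x :: xs)) ++ (g ++ "\n") := by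
          rw [join_nl' _ (by simp), catNL_append]
          simp [catNL, String.append_assoc]
        simp only [List.append_assoc, List.cons_append, List.nil_append]
        refine congrArg _ (congrArg₂ _ ?_ rfl)
        apply String.toList_inj.mp
        have hj := congrArg String.toList hjoin
        simp only [String.toList_append] at hj ⊢
        rw [show ∀ a b c d e : List Char, a ++ b ++ c ++ d ++ e = a ++ ((b ++ (c ++ d)) ++ e) from
          by intros; simp]
        rw [show ∀ a b d e : List Char, a ++ b ++ d ++ e = a ++ ((b ++ d) ++ e) from
          by intros; simp]
        rw [← hj]

lemma pyRange35_nil (a b : Int) (h : b ≤ a) : PySem.List.pyRange a b 35 = [] := by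
  rw [PySem.List.pyRange_of_pos _ _ (by norm_num), if_neg (by omega)]
  simp

lemma pyRange35_cons (a b : Int) (h : a < b) :
    PySem.List.pyRange a b 35 = a :: PySem.List.pyRange (a + 35) b 35 := by
  rw [PySem.List.pyRange_of_pos _ _ (by norm_num), PySem.List.pyRange_of_pos _ _ (by norm_num),
    if_pos h]
  by_cases h2 : a + 35 < b
  · rw [if_pos h2, show ((b - a + 35 - 1) / 35).toNat = ((b - (a + 35) + 35 - 1) / 35).toNat + 1 by omega,
      List.range_succ_eq_map]
    simp only [List.map_cons, List.map_map, Nat.cast_zero]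
    refine congrArg₂ _ (by ring) ?_
    refine List.map_congr_left ?_
    intro j _
    simp only [Function.comp_apply]
    push_cast
    ring
  · rw [if_neg h2, show ((b - a + 35 - 1) / 35).toNat = 1 by omega]
    simp

lemma foldB_blocks (spl : List String) : ∀ (n : Nat) (k : Nat) (ret : List String),
    (spl.drop (35 * k)).length ≤ n →
    (PySem.List.pyRange ((35 * k : Nat) : Int) (spl.length : Int) 35).foldl
      (fun ret c =>
        ret ++ [lstHeader c ++ PySem.Str.join "\n" (PySem.List.slice spl (some c) (some (c + 35)))
                  ++ "\n" ++ "\\end{lstlisting}"]) ret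
      = ret ++ blocks (spl.drop (35 * k)) k := by
  intro n
  induction n with
  | zero =>
    intro k ret hlen
    have hle : spl.length ≤ 35 * k := by simp only [List.length_drop] at hlen; omega
    rw [pyRange35_nil _ _ (by exact_mod_cast hle), List.drop_eq_nil_of_le hle, blocks_nil]
    simp
  | succ m ih =>
    intro k ret hlen
    by_cases hlt : 35 * k < spl.length
    · rw [pyRange35_cons _ _ (by exact_mod_cast hlt), List.foldl_cons]
      have hslice : PySem.List.slice spl (some ((35 * k : Nat) : Int)) (some (((35 * k : Nat) : Int) + 35))
          = List.take 35 (List.drop (35 * k) spl) := by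
        have h := PySem.List.slice_natCast_add spl (35 * k) 35
        simpa using h
      have e : ((35 * k : Nat) : Int) + 35 = ((35 * (k + 1) : Nat) : Int) := by push_cast; ring
      rw [hslice, e, ih (k + 1) _ (by simp only [List.length_drop] at hlen ⊢; omega)]
      cases hd : spl.drop (35 * k) with
      | nil => simp [List.drop_eq_nil_iff] at hd; omega
      | cons y ys =>
        rw [blocks_cons]
        have hdd : List.drop 35 (y :: ys) = spl.drop (35 * (k + 1)) := by
          rw [← hd, List.drop_drop]
          refine congrArg₂ _ (by omega) rfl
        rw [hdd]
        push_cast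
        simp
    · rw [pyRange35_nil _ _ (by push_cast; omega),
        List.drop_eq_nil_of_le (by omega), blocks_nil]
      simp

-- ===== VERDICT (by name: the statement is the Claim_ definition above) =====
theorem build_lstlstings_spec : Claim_equal_build_lstlstings := by
  intro src _
  simp only [Spec_build_lstlstings, build_lstlstings, build_lstlstings_alt]
  have hA := foldA_blocks ((PySem.Str.split? src "\n").getD []).length
    ((PySem.Str.split? src "\n").getD []) le_rfl 0 []
  have hB := foldB_blocks ((PySem.Str.split? src "\n").getD [])
    ((PySem.Str.split? src "\n").getD []).length 0 [] (by simp)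
  simp only [Nat.cast_zero, mul_zero, List.drop_zero, List.nil_append] at hA hB
  rw [show lstHeader 0 = "\\begin{lstlisting}[language=bash]\n" from by simp [lstHeader]] at hA
  rw [hA, hB]
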